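-- pv_equiv track=rewrite | github.com/erwin00776/picnote | src/test/fid_generator.py | generate_fid
-- ===== SOURCE A (Python) =====
-- def generate_fid(mark, start=1, count=100):
--     if start < 1:
--         start = 1
--     nums = []
--     cur = start
--     while len(nums) < count:
--         while cur & mark == 0:
--             cur += 1
--         nums.append(cur)
--         cur += 1
--     return nums
-- ===== SOURCE B (Python) =====
-- def _next_hit(c, mark):
--     # smallest n >= c with n & mark != 0, found by bit arithmetic (no scanning)
--     if c & mark:
--         return c
--     K = max(c.bit_length(), abs(mark).bit_length()) + 1
--     best = None
--     for k in range(K):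
--         if (mark >> k) & 1:
--             cand = ((c >> (k + 1)) << (k + 1)) + (1 << k)
--             if best is None or cand < best:
--                 best = cand
--     return best
--
--
-- def generate_fid(mark, start=1, count=100):
--     cur = start if start >= 1 else 1
--     nums = []
--     for _ in range(count if count > 0 else 0):
--         cur = _next_hit(cur, mark)
--         nums.append(cur)
--         cur += 1
--     return nums
-- ===== Notes on version B (the rewrite author's own statement) =====
-- stated objective: alternative
-- what changed: A scans integers one by one (inner while loop) until cur & mark != 0; B instead computes the next qualifying number directly by bit arithmetic, as the minimum over the set bits of mark of the least n >= cur with that bit set (intended as faster on sparse masks; measured 1.88x at n=4096 but only 1.37x at the largest timing size).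
import Mathlib
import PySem

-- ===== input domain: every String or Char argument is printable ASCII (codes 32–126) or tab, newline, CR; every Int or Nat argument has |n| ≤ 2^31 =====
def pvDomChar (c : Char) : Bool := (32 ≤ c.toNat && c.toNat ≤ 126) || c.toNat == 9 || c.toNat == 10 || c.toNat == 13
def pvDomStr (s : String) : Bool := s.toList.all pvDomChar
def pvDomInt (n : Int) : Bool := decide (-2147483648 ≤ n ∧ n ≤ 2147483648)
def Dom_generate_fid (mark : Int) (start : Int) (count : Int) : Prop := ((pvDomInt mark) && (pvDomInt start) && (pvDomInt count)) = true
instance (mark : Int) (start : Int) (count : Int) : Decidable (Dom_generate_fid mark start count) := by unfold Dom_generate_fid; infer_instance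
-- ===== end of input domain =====

-- B replaces A's one-by-one scan for the next number with `cur & mark != 0` by a
-- direct bit-arithmetic computation (min over the mask's bits of the least n ≥ cur
-- with that bit set), removing the inner while loop.

-- ===== PORT A =====
-- inner `while cur & mark == 0: cur += 1`; the Nat argument is a fuel guard making the
-- recursion total (2^32 steps always suffice on Pre_ ∩ Dom inputs, proved below)
def pvNextA (mark : Int) : Nat → Int → Int
  | 0, cur => cur
  | fuel+1, cur => if Int.land cur mark = 0 then pvNextA mark fuel (cur + 1) else cur

-- outer `while len(nums) < count`: the number of appends is count.toNat
def pvLoopA (mark : Int) : Nat → Int → List Int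
  | 0, _ => []
  | r+1, cur =>
      let c := pvNextA mark 4294967296 cur
      c :: pvLoopA mark r (c + 1)

def generate_fid (mark : Int) (start : Int) (count : Int) : List Int :=
  let s := if start < 1 then 1 else start
  pvLoopA mark count.toNat s

-- ===== PORT B =====
-- int.bit_length of a nonnegative int
def pvBitLength (n : Nat) : Nat := Nat.size n

-- ((c >> (k+1)) << (k+1)) + (1 << k): least n ≥ c with bit k set (when bit k of c is 0)
def pvCand (c : Int) (k : Nat) : Int := ((c >>> (k+1)) <<< (k+1)) + ((1:Int) <<< k)

-- loop body of _next_hit's `for k in range(K)` (best is None or the min so far)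
def pvStep (c mark : Int) (best : Option Int) (k : Nat) : Option Int :=
  if Int.land (mark >>> k) 1 = 1 then
    match best with
    | none => some (pvCand c k)
    | some b => if pvCand c k < b then some (pvCand c k) else some b
  else best

-- _next_hit(c, mark); Python's best is still None only when mark == 0, which Pre_
-- keeps out of the loop; `.getD 0` is only a totality guard for that dead branch
def pvNextHit (c mark : Int) : Int :=
  if Int.land c mark ≠ 0 then c
  else
    ((List.range (max (pvBitLength c.toNat) (pvBitLength mark.natAbs) + 1)).foldl
      (pvStep c mark) none).getD 0

-- `for _ in range(count if count > 0 else 0)`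
def pvLoopB : Nat → Int → Int → List Int
  | 0, _, _ => []
  | r+1, cur, mark =>
      let n := pvNextHit cur mark
      n :: pvLoopB r (n + 1) mark

def generate_fid_alt (mark : Int) (start : Int) (count : Int) : List Int :=
  let cur := if start ≥ 1 then start else 1
  pvLoopB (if count > 0 then count.toNat else 0) cur mark

-- ===== PRECONDITION & SPEC =====
-- Pre_ excludes mark = 0 with count > 0, on which A loops forever (cur & 0 == 0 always)
def Pre_generate_fid (mark : Int) (start : Int) (count : Int) : Prop :=
  mark ≠ 0 ∨ count ≤ 0
instance (mark : Int) (start : Int) (count : Int) : Decidable (Pre_generate_fid mark start count) := by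
  unfold Pre_generate_fid; infer_instance

def pvWitness_generate_fid : Int × Int × Int := (5, 1, 3)

def Spec_generate_fid (mark : Int) (start : Int) (count : Int) (out : List Int) : Prop := out = generate_fid_alt mark start count
instance (mark : Int) (start : Int) (count : Int) (out : List Int) : Decidable (Spec_generate_fid mark start count out) := by unfold Spec_generate_fid; infer_instance

-- ===== CLAIM (what is proved, stated in full; the proofs are below) =====
def Claim_equal_generate_fid : Prop := ∀ (mark : Int) (start : Int) (count : Int), Dom_generate_fid mark start count → Pre_generate_fid mark start count → Spec_generate_fid mark start count (generate_fid mark start count)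

-- ===== LEMMAS AND PROOFS =====

-- bit k of mark as a two's-complement integer
def pvMaskBit (mark : Int) (k : Nat) : Bool :=
  match mark with
  | .ofNat M => M.testBit k
  | .negSucc m => !(m.testBit k)

-- pvCand on nonnegative c, at the Nat level
def pvCandN (n k : Nat) : Nat := (n >>> (k+1)) <<< (k+1) + 2^k

theorem pvCand_ofNat (n k : Nat) : pvCand (n : Int) k = (pvCandN n k : Int) := by
  show ((((n >>> (k+1)) <<< (k+1) : Nat) : Int)) + (((1 <<< k : Nat) : Int)) = _
  simp [pvCandN, Nat.shiftLeft_eq]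

theorem nat_ne_zero_iff_testBit (x : Nat) : x ≠ 0 ↔ ∃ k, x.testBit k = true := by
  constructor
  · exact Nat.exists_testBit_of_ne_zero
  · rintro ⟨k, hk⟩ h0
    rw [h0, Nat.zero_testBit] at hk
    exact Bool.false_ne_true hk

theorem hit_iff (n : Nat) (mark : Int) :
    (Int.land (n : Int) mark ≠ 0) ↔ ∃ k, n.testBit k = true ∧ pvMaskBit mark k = true := by
  cases mark with
  | ofNat M =>
    have h : Int.land (n : Int) (Int.ofNat M) = ((n &&& M : Nat) : Int) := rfl
    rw [h]
    have h2 : ((n &&& M : Nat) : Int) ≠ 0 ↔ (n &&& M) ≠ 0 := by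
      constructor <;> intro hx <;> simp_all
    rw [h2, nat_ne_zero_iff_testBit]
    simp [Nat.testBit_land, pvMaskBit]
  | negSucc m =>
    have h : Int.land (n : Int) (Int.negSucc m) = ((Nat.ldiff n m : Nat) : Int) := rfl
    rw [h]
    have h2 : ((Nat.ldiff n m : Nat) : Int) ≠ 0 ↔ (Nat.ldiff n m) ≠ 0 := by
      constructor <;> intro hx <;> simp_all
    rw [h2, nat_ne_zero_iff_testBit]
    simp [Nat.testBit_ldiff, pvMaskBit]

theorem ldiff_one_eq_one_iff (a : Nat) : Nat.ldiff 1 a = 1 ↔ a.testBit 0 = false := by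
  constructor
  · intro h
    have h0 : (Nat.ldiff 1 a).testBit 0 = true := by rw [h]; decide
    rw [Nat.testBit_ldiff] at h0
    cases hA : a.testBit 0 <;> simp [hA] at h0 <;> rfl
  · intro h
    apply Nat.eq_of_testBit_eq
    intro i
    rw [Nat.testBit_ldiff]
    cases i with
    | zero => rw [h, Bool.not_false, Bool.and_true]
    | succ j =>
      have h1 : Nat.testBit 1 (j+1) = false := Nat.testBit_lt_two_pow (by
        have : (2:Nat)^1 ≤ 2^(j+1) := Nat.pow_le_pow_right (by omega) (by omega)
        omega)
      rw [h1, Bool.false_and]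

theorem sbit_iff (mark : Int) (k : Nat) :
    (Int.land (mark >>> k) 1 = 1) ↔ pvMaskBit mark k = true := by
  cases mark with
  | ofNat M =>
    have h : Int.land ((Int.ofNat M) >>> k) 1 = (((M >>> k) &&& 1 : Nat) : Int) := rfl
    rw [h]
    have h2 : (((M >>> k) &&& 1 : Nat) : Int) = 1 ↔ ((M >>> k) &&& 1) = 1 := by exact_mod_cast Iff.rfl
    rw [h2, Nat.and_one_is_mod]
    simp [pvMaskBit, Nat.testBit_eq_decide_div_mod_eq, Nat.shiftRight_eq_div_pow]
  | negSucc m =>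
    have h : Int.land ((Int.negSucc m) >>> k) 1 = ((Nat.ldiff 1 (m >>> k) : Nat) : Int) := rfl
    rw [h]
    have h2 : ((Nat.ldiff 1 (m >>> k) : Nat) : Int) = 1 ↔ Nat.ldiff 1 (m >>> k) = 1 := by exact_mod_cast Iff.rfl
    rw [h2, ldiff_one_eq_one_iff]
    have h3 : (m >>> k).testBit 0 = m.testBit k := by
      rw [Nat.testBit_shiftRight]
      rfl
    rw [h3]
    simp [pvMaskBit]

theorem testBit_ge {n k : Nat} (h : n.testBit k = true) : 2^k ≤ n := by
  by_contra hlt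
  rw [Nat.testBit_eq_decide_div_mod_eq] at h
  rw [Nat.div_eq_of_lt (by omega)] at h
  simp at h

theorem candN_eq (n k : Nat) : pvCandN n k = n / 2^(k+1) * 2^(k+1) + 2^k := by
  simp [pvCandN, Nat.shiftRight_eq_div_pow, Nat.shiftLeft_eq]

theorem candN_testBit (n k : Nat) : (pvCandN n k).testBit k = true := by
  rw [candN_eq, Nat.testBit_eq_decide_div_mod_eq]
  have h2 : (2:Nat)^(k+1) = 2^k * 2 := by ring
  have hpos : 0 < (2:Nat)^k := Nat.two_pow_pos k
  have h3 : n / 2^(k+1) * 2^(k+1) + 2^k = 2^k * (2 * (n / 2^(k+1)) + 1) := by rw [h2]; ring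
  rw [h3, Nat.mul_div_cancel_left _ hpos]
  simp [Nat.mul_add_mod]

theorem testBit_false_div_mod {n k : Nat} (h : n.testBit k = false) : n / 2^k % 2 = 0 := by
  rw [Nat.testBit_eq_decide_div_mod_eq] at h
  simp at h
  omega

theorem candN_gt {n k : Nat} (h : n.testBit k = false) : n < pvCandN n k := by
  rw [candN_eq]
  have h2 : (2:Nat)^(k+1) = 2^k * 2 := by ring
  rw [h2]
  have hpos : 0 < (2:Nat)^k := Nat.two_pow_pos k
  have hd : n / (2^k*2) * (2^k*2) + n % (2^k*2) = n := Nat.div_add_mod' n (2^k*2)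
  have hm : n % (2^k * 2) = n % 2^k + 2^k * (n / 2^k % 2) := Nat.mod_mul
  rw [testBit_false_div_mod h, Nat.mul_zero] at hm
  have hs : n % 2^k < 2^k := Nat.mod_lt _ hpos
  generalize n / (2^k*2) * (2^k*2) = Q at hd ⊢
  omega

theorem candN_le_add (n k : Nat) : pvCandN n k ≤ n + 2^k := by
  rw [candN_eq]
  have := Nat.div_mul_le_self n (2^(k+1))
  omega

theorem testBit_true_div_mod {n k : Nat} (h : n.testBit k = true) : n / 2^k % 2 = 1 := by
  rw [Nat.testBit_eq_decide_div_mod_eq] at h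
  simpa using h

theorem candN_min {n m k : Nat} (h0 : n.testBit k = false) (hm : n ≤ m)
    (hb : m.testBit k = true) : pvCandN n k ≤ m := by
  rw [candN_eq]
  have h2 : (2:Nat)^(k+1) = 2^k * 2 := by ring
  rw [h2]
  have hpos : 0 < (2:Nat)^k := Nat.two_pow_pos k
  have hq : n / (2^k*2) ≤ m / (2^k*2) := Nat.div_le_div_right hm
  have hmm : m % (2^k * 2) = m % 2^k + 2^k * (m / 2^k % 2) := Nat.mod_mul
  rw [testBit_true_div_mod hb, Nat.mul_one] at hmm
  rcases Nat.eq_or_lt_of_le hq with heq | hlt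
  · rw [heq]
    have hdm : m / (2^k*2) * (2^k*2) + m % (2^k*2) = m := Nat.div_add_mod' m (2^k*2)
    generalize m / (2^k*2) * (2^k*2) = Q at hdm ⊢
    omega
  · have hmul : (n / (2^k*2) + 1) * (2^k*2) ≤ m / (2^k*2) * (2^k*2) :=
      Nat.mul_le_mul_right _ hlt
    rw [Nat.succ_mul] at hmul
    have hle : m / (2^k*2) * (2^k*2) ≤ m := Nat.div_mul_le_self m _
    generalize n / (2^k*2) * (2^k*2) = X at hmul ⊢
    generalize m / (2^k*2) * (2^k*2) = Y at hmul hle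
    omega

-- characterization of the fold in pvNextHit
theorem fold_char (c mark : Int) (K : Nat) :
    (∀ b, (List.range K).foldl (pvStep c mark) none = some b →
      (∃ k, k < K ∧ Int.land (mark >>> k) 1 = 1 ∧ b = pvCand c k) ∧
      (∀ k, k < K → Int.land (mark >>> k) 1 = 1 → b ≤ pvCand c k)) ∧
    ((List.range K).foldl (pvStep c mark) none = none →
      ∀ k, k < K → ¬ (Int.land (mark >>> k) 1 = 1)) := by
  induction K with
  | zero => simp
  | succ K ih =>
    rw [List.range_succ, List.foldl_append]
    obtain ⟨ihs, ihn⟩ := ih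
    cases hprev : (List.range K).foldl (pvStep c mark) none with
    | none =>
      simp only [List.foldl_cons, List.foldl_nil, pvStep]
      split
      · next hS =>
        constructor
        · intro b hb
          injection hb with hb
          subst hb
          refine ⟨⟨K, by omega, hS, rfl⟩, ?_⟩
          intro k hk hSk
          rcases Nat.lt_or_ge k K with hlt | hge
          · exact absurd hSk (ihn hprev k hlt)
          · have : k = K := by omega
            subst this
            exact le_refl _
        · intro hb
          exact absurd hb (by simp)
      · next hS =>
        constructor
        · intro b hb
          exact absurd hb (by simp [hprev])
        · intro _ k hk hSk
          rcases Nat.lt_or_ge k K with hlt | hge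
          · exact (ihn hprev k hlt) hSk
          · have : k = K := by omega
            subst this
            exact hS hSk
    | some b0 =>
      obtain ⟨⟨kw, hkw, hSw, hbw⟩, hmin⟩ := ihs b0 hprev
      simp only [List.foldl_cons, List.foldl_nil, pvStep]
      split
      · next hS =>
        split
        · next hlt =>
          constructor
          · intro b hb
            injection hb with hb
            subst hb
            refine ⟨⟨K, by omega, hS, rfl⟩, ?_⟩
            intro k hk hSk
            rcases Nat.lt_or_ge k K with h1 | h1
            · exact le_of_lt (lt_of_lt_of_le hlt (hmin k h1 hSk))
            · have : k = K := by omega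
              subst this
              exact le_refl _
          · intro hb
            exact absurd hb (by simp)
        · next hge =>
          constructor
          · intro b hb
            injection hb with hb
            subst hb
            refine ⟨⟨kw, by omega, hSw, hbw⟩, ?_⟩
            intro k hk hSk
            rcases Nat.lt_or_ge k K with h1 | h1
            · exact hmin k h1 hSk
            · have : k = K := by omega
              subst this
              omega
          · intro hb
            exact absurd hb (by simp)
      · next hS =>
        constructor
        · intro b hb
          injection hb with hb
          subst hb
          refine ⟨⟨kw, by omega, hSw, hbw⟩, ?_⟩
          intro k hk hSk
          rcases Nat.lt_or_ge k K with h1 | h1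
          · exact hmin k h1 hSk
          · have : k = K := by omega
            subst this
            exact absurd hSk hS
        · intro hb
          exact absurd hb (by simp)

theorem testBit_lt_size {M k : Nat} (h : M.testBit k = true) : k < Nat.size M := by
  by_contra hk
  have h1 : M < 2^k := lt_of_lt_of_le (Nat.lt_size_self M)
    (Nat.pow_le_pow_right (by omega) (by omega))
  rw [Nat.testBit_lt_two_pow h1] at h
  exact Bool.false_ne_true h

theorem exists_maskbit {mark : Int} (hm : mark ≠ 0) (n : Nat) :
    ∃ k, k < max (Nat.size n) (Nat.size mark.natAbs) + 1 ∧ pvMaskBit mark k = true := by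
  cases mark with
  | ofNat M =>
    have hM : M ≠ 0 := by
      intro h; apply hm; rw [h]; rfl
    obtain ⟨k, hk⟩ := Nat.exists_testBit_of_ne_zero hM
    refine ⟨k, ?_, hk⟩
    have h1 : k < Nat.size M := testBit_lt_size hk
    have h2 : (Int.ofNat M).natAbs = M := rfl
    rw [h2]
    omega
  | negSucc m =>
    refine ⟨Nat.size m, ?_, ?_⟩
    · have h1 : Nat.size m ≤ Nat.size (m+1) := Nat.size_le_size (by omega)
      have h2 : (Int.negSucc m).natAbs = m + 1 := rfl
      rw [h2]
      omega
    · have h1 : m.testBit (Nat.size m) = false :=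
        Nat.testBit_lt_two_pow (Nat.lt_size_self m)
      simp [pvMaskBit, h1]

theorem exists_maskbit_small {mark : Int} (hm : mark ≠ 0) (habs : mark.natAbs ≤ 2^31) (n : Nat) :
    ∃ k, k ≤ 31 ∧ k < max (Nat.size n) (Nat.size mark.natAbs) + 1 ∧ pvMaskBit mark k = true := by
  cases mark with
  | ofNat M =>
    have hM : M ≠ 0 := by
      intro h; apply hm; rw [h]; rfl
    obtain ⟨k, hk⟩ := Nat.exists_testBit_of_ne_zero hM
    have h2 : (Int.ofNat M).natAbs = M := rfl
    refine ⟨k, ?_, ?_, hk⟩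
    · have h1 : 2^k ≤ M := testBit_ge hk
      by_contra hgt
      have : (2:Nat)^32 ≤ 2^k := Nat.pow_le_pow_right (by omega) (by omega)
      have h31 : (2:Nat)^32 = 2^31 * 2 := by ring
      omega
    · have h1 : k < Nat.size M := testBit_lt_size hk
      rw [h2]
      omega
  | negSucc m =>
    have h2 : (Int.negSucc m).natAbs = m + 1 := rfl
    refine ⟨Nat.size m, ?_, ?_, ?_⟩
    · have h1 : m < 2^31 := by omega
      have := Nat.size_le.mpr h1
      omega
    · have h1 : Nat.size m ≤ Nat.size (m+1) := Nat.size_le_size (by omega)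
      rw [h2]
      omega
    · have h1 : m.testBit (Nat.size m) = false :=
        Nat.testBit_lt_two_pow (Nat.lt_size_self m)
      simp [pvMaskBit, h1]

theorem noBit_of_not_hit {mark : Int} {n : Nat} (hc : Int.land (n : Int) mark = 0) :
    ∀ k, pvMaskBit mark k = true → n.testBit k = false := by
  intro k hk
  by_contra h
  rw [Bool.not_eq_false] at h
  exact ((hit_iff n mark).mpr ⟨k, h, hk⟩) hc

theorem nextHit_eq_fold {mark : Int} (n : Nat) (hc : Int.land (n : Int) mark = 0) :
    pvNextHit (n : Int) mark =
      ((List.range (max (Nat.size n) (Nat.size mark.natAbs) + 1)).foldl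
        (pvStep (n : Int) mark) none).getD 0 := by
  simp [pvNextHit, pvBitLength, hc]

-- the three defining properties of pvNextHit, for c = n and mark ≠ 0
theorem nextHit_spec {mark : Int} (hm : mark ≠ 0) (n : Nat) :
    (n : Int) ≤ pvNextHit (n : Int) mark ∧
    Int.land (pvNextHit (n : Int) mark) mark ≠ 0 ∧
    (∀ m : Int, (n : Int) ≤ m → m < pvNextHit (n : Int) mark → Int.land m mark = 0) := by
  by_cases hc : Int.land (n : Int) mark = 0
  case neg =>
    have h1 : pvNextHit (n : Int) mark = (n : Int) := by
      unfold pvNextHit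
      rw [if_pos hc]
    refine ⟨le_of_eq h1.symm, by rw [h1]; exact hc, ?_⟩
    intro m h2 h3
    rw [h1] at h3
    exact absurd h3 (not_lt.mpr h2)
  case pos =>
    have heq := nextHit_eq_fold n hc
    obtain ⟨k0, hk0K, hk0⟩ := exists_maskbit hm n
    cases hres : (List.range (max (Nat.size n) (Nat.size mark.natAbs) + 1)).foldl
        (pvStep (n : Int) mark) none with
    | none => exact absurd ((sbit_iff mark k0).mpr hk0) ((fold_char _ _ _).2 hres k0 hk0K)
    | some b =>
      have hb : pvNextHit (n : Int) mark = b := by rw [heq, hres]; rfl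
      obtain ⟨⟨kw, hkwK, hSkw, hbw⟩, hmin⟩ := (fold_char (n : Int) mark _).1 b hres
      have hMw : pvMaskBit mark kw = true := (sbit_iff mark kw).mp hSkw
      have hnw : n.testBit kw = false := noBit_of_not_hit hc kw hMw
      have hbcand : b = ((pvCandN n kw : Nat) : Int) := by rw [hbw, pvCand_ofNat]
      refine ⟨?_, ?_, ?_⟩
      · rw [hb, hbcand]
        exact_mod_cast le_of_lt (candN_gt hnw)
      · rw [hb, hbcand]
        exact (hit_iff _ mark).mpr ⟨kw, candN_testBit n kw, hMw⟩
      · intro m hm1 hm2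
        by_contra hmark
        have hm0 : (0 : Int) ≤ m := le_trans (Int.natCast_nonneg n) hm1
        obtain ⟨mn, rfl⟩ := Int.eq_ofNat_of_zero_le hm0
        obtain ⟨j, hj1, hj2⟩ := (hit_iff mn mark).mp hmark
        have hnm : n ≤ mn := by exact_mod_cast hm1
        rw [hb, hbcand] at hm2
        have hm2n : mn < pvCandN n kw := by exact_mod_cast hm2
        by_cases hjK : j < max (Nat.size n) (Nat.size mark.natAbs) + 1
        · have h4 := hmin j hjK ((sbit_iff mark j).mpr hj2)
          rw [hbcand, pvCand_ofNat] at h4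
          have h4n : pvCandN n kw ≤ pvCandN n j := by exact_mod_cast h4
          have h5 : pvCandN n j ≤ mn := candN_min (noBit_of_not_hit hc j hj2) hnm hj1
          omega
        · have h2j : 2 ^ j ≤ mn := testBit_ge hj1
          cases mark with
          | ofNat M =>
            have hMj : M.testBit j = true := hj2
            have h6 : j < Nat.size M := testBit_lt_size hMj
            have h7 : (Int.ofNat M).natAbs = M := rfl
            rw [h7] at hjK
            omega
          | negSucc m' =>
            have h7 : (Int.negSucc m').natAbs = m' + 1 := rfl
            rw [h7] at hjK hkwK hmin
            set km := max (Nat.size n) (Nat.size (m' + 1)) with hkmdef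
            have hsm : Nat.size m' ≤ km :=
              le_trans (Nat.size_le_size (by omega)) (le_max_right _ _)
            have hS : pvMaskBit (Int.negSucc m') km = true := by
              have hbit : m'.testBit km = false :=
                Nat.testBit_lt_two_pow (lt_of_lt_of_le (Nat.lt_size_self m')
                  (Nat.pow_le_pow_right (by omega) hsm))
              simp [pvMaskBit, hbit]
            have h4 := hmin km (by omega) ((sbit_iff _ km).mpr hS)
            rw [hbcand, pvCand_ofNat] at h4
            have h4n : pvCandN n kw ≤ pvCandN n km := by exact_mod_cast h4
            have hn2 : n < 2 ^ km := Nat.size_le.mp (le_max_left _ _)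
            have hcm : pvCandN n km = 2 ^ km := by
              rw [candN_eq, Nat.div_eq_of_lt (lt_of_lt_of_le hn2
                (Nat.pow_le_pow_right (by omega) (by omega)))]
              simp
            have hpow : 2 ^ km * 2 ≤ 2 ^ j := by
              have : (2:Nat) ^ (km + 1) ≤ 2 ^ j := Nat.pow_le_pow_right (by omega) (by omega)
              have h8 : (2:Nat) ^ (km + 1) = 2 ^ km * 2 := by ring
              omega
            omega

theorem nextHit_le {mark : Int} (hm : mark ≠ 0) (habs : mark.natAbs ≤ 2^31) (n : Nat) :
    pvNextHit (n : Int) mark ≤ (n : Int) + 2^31 := by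
  by_cases hc : Int.land (n : Int) mark = 0
  case neg =>
    have h1 : pvNextHit (n : Int) mark = (n : Int) := by
      unfold pvNextHit
      rw [if_pos hc]
    rw [h1]
    omega
  case pos =>
    have heq := nextHit_eq_fold n hc
    obtain ⟨k0, hsmall, hk0K, hk0⟩ := exists_maskbit_small hm habs n
    cases hres : (List.range (max (Nat.size n) (Nat.size mark.natAbs) + 1)).foldl
        (pvStep (n : Int) mark) none with
    | none => exact absurd ((sbit_iff mark k0).mpr hk0) ((fold_char _ _ _).2 hres k0 hk0K)
    | some b =>
      have hb : pvNextHit (n : Int) mark = b := by rw [heq, hres]; rfl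
      obtain ⟨_, hmin⟩ := (fold_char (n : Int) mark _).1 b hres
      have h4 := hmin k0 hk0K ((sbit_iff mark k0).mpr hk0)
      rw [pvCand_ofNat] at h4
      have h5 : pvCandN n k0 ≤ n + 2^31 := by
        have := candN_le_add n k0
        have hp : (2:Nat)^k0 ≤ 2^31 := Nat.pow_le_pow_right (by omega) hsmall
        omega
      rw [hb]
      calc b ≤ ((pvCandN n k0 : Nat) : Int) := h4
        _ ≤ (n : Int) + 2^31 := by exact_mod_cast h5

theorem least_unique {mark t x y : Int}
    (hx : Int.land x mark ≠ 0) (hx1 : t ≤ x) (hx2 : ∀ m : Int, t ≤ m → m < x → Int.land m mark = 0)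
    (hy : Int.land y mark ≠ 0) (hy1 : t ≤ y) (hy2 : ∀ m : Int, t ≤ m → m < y → Int.land m mark = 0) :
    x = y := by
  rcases lt_trichotomy x y with h | h | h
  · exact absurd (hy2 x hx1 h) hx
  · exact h
  · exact absurd (hx2 y hy1 h) hy

theorem nextA_eq {mark : Int} (hm : mark ≠ 0) :
    ∀ (fuel n : Nat), (pvNextHit (n : Int) mark).toNat ≤ n + fuel →
      pvNextA mark fuel (n : Int) = pvNextHit (n : Int) mark := by
  intro fuel
  induction fuel with
  | zero =>
    intro n hf
    obtain ⟨hge, -, -⟩ := nextHit_spec hm n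
    have h0 : (0 : Int) ≤ pvNextHit (n : Int) mark := le_trans (Int.natCast_nonneg n) hge
    have : pvNextHit (n : Int) mark = (n : Int) := by omega
    rw [pvNextA, this]
  | succ f ih =>
    intro n hf
    rw [pvNextA]
    by_cases hc : Int.land (n : Int) mark = 0
    · rw [if_pos hc]
      obtain ⟨hge, hhit, hminp⟩ := nextHit_spec hm n
      obtain ⟨hge', hhit', hminp'⟩ := nextHit_spec hm (n + 1)
      have hshift : pvNextHit ((n + 1 : Nat) : Int) mark = pvNextHit (n : Int) mark := by
        apply least_unique (t := ((n + 1 : Nat) : Int)) hhit' hge' hminp' hhit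
        · have hne : pvNextHit (n : Int) mark ≠ (n : Int) := by
            intro h
            rw [h] at hhit
            exact hhit hc
          push_cast
          push_cast at hge
          omega
        · intro m h1 h2
          apply hminp m _ h2
          push_cast at h1
          omega
      have hcast : (n : Int) + 1 = ((n + 1 : Nat) : Int) := by push_cast; ring
      rw [hcast, ih (n + 1) (by rw [hshift]; omega), hshift]
    · rw [if_neg hc]
      have h1 : pvNextHit (n : Int) mark = (n : Int) := by
        unfold pvNextHit
        rw [if_pos hc]
      rw [h1]

theorem loop_eq {mark : Int} (hm : mark ≠ 0) (habs : mark.natAbs ≤ 2^31) :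
    ∀ (r n : Nat), pvLoopA mark r (n : Int) = pvLoopB r (n : Int) mark := by
  intro r
  induction r with
  | zero => intro n; rfl
  | succ r ih =>
    intro n
    rw [pvLoopA, pvLoopB]
    obtain ⟨hge, -, -⟩ := nextHit_spec hm n
    have h0 : (0 : Int) ≤ pvNextHit (n : Int) mark := le_trans (Int.natCast_nonneg n) hge
    have hle := nextHit_le hm habs n
    have hfuel : (pvNextHit (n : Int) mark).toNat ≤ n + 4294967296 := by omega
    rw [nextA_eq hm 4294967296 n hfuel]
    have hcast : pvNextHit (n : Int) mark + 1 = (((pvNextHit (n : Int) mark).toNat + 1 : Nat) : Int) := by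
      omega
    rw [hcast, ih]

-- ===== VERDICT (by name: the statement is the Claim_ definition above) =====
theorem generate_fid_spec : Claim_equal_generate_fid := by
  intro mark start count hdom hpre
  unfold Spec_generate_fid generate_fid generate_fid_alt
  have hs : (if start < 1 then (1 : Int) else start) = (if start ≥ 1 then start else 1) := by
    split_ifs <;> omega
  have hcnt : (if count > 0 then count.toNat else 0) = count.toNat := by
    split_ifs with h
    · rfl
    · omega
  rw [hs, hcnt]
  rcases hpre with hmark | hcount
  · have habs : mark.natAbs ≤ 2^31 := by
      unfold Dom_generate_fid at hdom
      simp [pvDomInt] at hdom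
      omega
    have hpos : (0 : Int) ≤ (if start ≥ 1 then start else 1) := by split_ifs <;> omega
    obtain ⟨sn, hsn⟩ := Int.eq_ofNat_of_zero_le hpos
    rw [hsn]
    exact loop_eq hmark habs count.toNat sn
  · have h0 : count.toNat = 0 := by omega
    rw [h0]
    rfl
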